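-- pv_equiv track=rewrite | github.com/emmelinetsen/SWE | Misc/stringToHTML.py | stringToHTML
-- ===== SOURCE A (Python) =====
-- def stringToHTML(str, formats):
--     open_format = addFormatToDict(formats, 1)
--     close_format = addFormatToDict(formats, 2)
--
--     html = ""
--     for idx, char in enumerate(str):
--         if idx in open_format:
--             html += "<" + open_format[idx] + ">"
--         elif idx in close_format:
--             html += "</" + close_format[idx] + ">"
--         html += char
--
--     return html
--
-- def addFormatToDict(formats, position):
--     d = dict()
--     for i in range(len(formats)):
--         d[formats[i][position]] = formats[i][0]
--     return d
-- ===== SOURCE B (Python) =====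
-- def stringToHTML(str, formats):
--     n = len(str)
--     tags = {}
--     for fmt in formats:
--         if 0 <= fmt[2] < n:
--             tags[fmt[2]] = "</" + fmt[0] + ">"
--     for fmt in formats:
--         if 0 <= fmt[1] < n:
--             tags[fmt[1]] = "<" + fmt[0] + ">"
--     pieces = []
--     prev = 0
--     for pos in sorted(tags):
--         pieces.append(str[prev:pos])
--         pieces.append(tags[pos])
--         prev = pos
--     pieces.append(str[prev:])
--     return "".join(pieces)
-- ===== Notes on version B (the rewrite author's own statement) =====
-- stated objective: faster
-- what changed: Instead of scanning every character and testing membership in two position-keyed dicts, B builds one position-to-tag table (close tags first, then open tags so open wins, dropping out-of-range positions) and assembles the result by walking the sorted tag positions, emitting untouched slices between tags via ''.join.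
import Mathlib
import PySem

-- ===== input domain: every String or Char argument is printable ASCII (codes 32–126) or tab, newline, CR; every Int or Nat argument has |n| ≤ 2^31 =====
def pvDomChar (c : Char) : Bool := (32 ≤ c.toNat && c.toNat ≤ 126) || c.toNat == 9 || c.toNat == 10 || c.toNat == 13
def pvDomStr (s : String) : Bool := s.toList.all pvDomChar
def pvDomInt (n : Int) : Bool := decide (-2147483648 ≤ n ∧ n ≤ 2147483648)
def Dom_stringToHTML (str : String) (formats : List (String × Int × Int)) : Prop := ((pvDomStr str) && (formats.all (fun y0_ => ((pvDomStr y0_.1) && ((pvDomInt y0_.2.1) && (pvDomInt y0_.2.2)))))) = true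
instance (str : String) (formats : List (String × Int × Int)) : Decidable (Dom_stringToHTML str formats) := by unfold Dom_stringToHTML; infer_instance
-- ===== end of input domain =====

-- B replaces A's per-character scan with two membership dicts by a single position→tag table
-- (open overwrites close, out-of-range dropped) walked in sorted order with slices between tags
-- (measured faster at large sizes in a timing run: slice copies replace per-character work).

-- ===== PORT A =====
-- fmt[position]: on the 3-tuples of this signature, position 1 reads .2.1 and position 2 reads .2.2
def addFormatToDict (formats : List (String × Int × Int)) (position : Int) : PySem.Dict Int String :=
  formats.foldl (fun d f => d.insert (if position == 1 then f.2.1 else f.2.2) f.1) PySem.Dict.empty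

def stringToHTML (str : String) (formats : List (String × Int × Int)) : String :=
  let openFormat := addFormatToDict formats 1
  let closeFormat := addFormatToDict formats 2
  let html := (PySem.List.enumerate str.toList).foldl
    (fun (html : List Char) (p : Int × Char) =>
      let html :=
        match openFormat.get? p.1 with
        | some v => html ++ ('<' :: (v.toList ++ ['>']))
        | none =>
          match closeFormat.get? p.1 with
          | some v => html ++ ('<' :: '/' :: (v.toList ++ ['>']))
          | none => html
      html ++ [p.2])
    ([] : List Char)
  String.ofList html

-- ===== PORT B =====
def stringToHTML_alt (str : String) (formats : List (String × Int × Int)) : String :=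
  let n : Int := str.toList.length
  let tags := formats.foldl
    (fun (d : PySem.Dict Int String) f =>
      if 0 ≤ f.2.2 ∧ f.2.2 < n then d.insert f.2.2 ("</" ++ f.1 ++ ">") else d)
    PySem.Dict.empty
  let tags := formats.foldl
    (fun (d : PySem.Dict Int String) f =>
      if 0 ≤ f.2.1 ∧ f.2.1 < n then d.insert f.2.1 ("<" ++ f.1 ++ ">") else d)
    tags
  let st := (PySem.List.sorted tags.keys (fun k => k)).foldl
    (fun (st : List Char × Int) pos =>
      (st.1 ++ PySem.List.slice str.toList (some st.2) (some pos)
           ++ (tags.getD pos "").toList,  -- tags[pos]: pos ranges over tags' keys, so the lookup succeeds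
       pos))
    (([] : List Char), (0 : Int))
  String.ofList (st.1 ++ PySem.List.slice str.toList (some st.2) none)

-- ===== PRECONDITION & SPEC =====
def Spec_stringToHTML (str : String) (formats : List (String × Int × Int)) (out : String) : Prop := out = stringToHTML_alt str formats
instance (str : String) (formats : List (String × Int × Int)) (out : String) : Decidable (Spec_stringToHTML str formats out) := by unfold Spec_stringToHTML; infer_instance

-- ===== CLAIM (what is proved, stated in full; the proofs are below) =====
def Claim_equal_stringToHTML : Prop := ∀ (str : String) (formats : List (String × Int × Int)), Dom_stringToHTML str formats → Spec_stringToHTML str formats (stringToHTML str formats)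

-- ===== LEMMAS AND PROOFS =====

-- B's tag table, as the proofs refer to it (definitionally the `tags` of stringToHTML_alt)
def bTags (formats : List (String × Int × Int)) (n : Int) : PySem.Dict Int String :=
  formats.foldl
    (fun (d : PySem.Dict Int String) f =>
      if 0 ≤ f.2.1 ∧ f.2.1 < n then d.insert f.2.1 ("<" ++ f.1 ++ ">") else d)
    (formats.foldl
      (fun (d : PySem.Dict Int String) f =>
        if 0 ≤ f.2.2 ∧ f.2.2 < n then d.insert f.2.2 ("</" ++ f.1 ++ ">") else d)
      PySem.Dict.empty)

-- the tag B emits before index i (empty when i carries no tag)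
def emitTag (tags : PySem.Dict Int String) (i : Int) : List Char :=
  ((tags.get? i).getD "").toList

-- canonical per-index emission: tag (if any) followed by the character, for indices s, s+1, …
def emitE (tags : PySem.Dict Int String) : List Char → Int → List Char
  | [], _ => []
  | c :: rest, s => emitTag tags s ++ c :: emitE tags rest (s + 1)

-- the tag A emits before index i
def aTag (openf closef : PySem.Dict Int String) (i : Int) : List Char :=
  match openf.get? i with
  | some v => '<' :: (v.toList ++ ['>'])
  | none =>
    match closef.get? i with
    | some v => '<' :: '/' :: (v.toList ++ ['>'])
    | none => []

-- A's per-index emission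
def aEmit (openf closef : PySem.Dict Int String) : List Char → Int → List Char
  | [], _ => []
  | c :: rest, s => aTag openf closef s ++ c :: aEmit openf closef rest (s + 1)

-- last-write-wins characterisation of an unguarded insert loop (A's dict builder)
theorem get?_plainFold {β : Type} (sel : β → Int) (mkv : β → String)
    (l : List β) (d : PySem.Dict Int String) (k : Int) :
    (l.foldl (fun d f => d.insert (sel f) (mkv f)) d).get? k
      = (match l.reverse.find? (fun f => sel f == k) with
         | some f => some (mkv f)
         | none => d.get? k) := by
  induction l generalizing d with
  | nil => simp
  | cons x l ih =>
    simp only [List.foldl_cons, List.reverse_cons, List.find?_append, ih]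
    cases hf : l.reverse.find? (fun f => sel f == k) with
    | some f => simp
    | none =>
      simp only [Option.none_or]
      by_cases hx : sel x = k
      · subst hx; simp [List.find?]
      · have hbx : (sel x == k) = false := by simp [hx]
        simp [List.find?, hbx, PySem.Dict.get?_insert, Ne.symm hx]

-- last-write-wins characterisation of a range-guarded insert loop (B's table builder)
theorem get?_guardFold {β : Type} (P : Int → Prop) [DecidablePred P]
    (sel : β → Int) (mkv : β → String)
    (l : List β) (d : PySem.Dict Int String) (k : Int) :
    (l.foldl (fun d f => if P (sel f) then d.insert (sel f) (mkv f) else d) d).get? k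
      = if P k then
          (match l.reverse.find? (fun f => sel f == k) with
           | some f => some (mkv f)
           | none => d.get? k)
        else d.get? k := by
  induction l generalizing d with
  | nil => simp
  | cons x l ih =>
    simp only [List.foldl_cons, List.reverse_cons, List.find?_append, ih]
    by_cases hPk : P k
    · simp only [if_pos hPk]
      cases hf : l.reverse.find? (fun f => sel f == k) with
      | some f => simp
      | none =>
        simp only [Option.none_or]
        by_cases hx : sel x = k
        · subst hx; simp [List.find?, if_pos hPk]
        · have hbx : (sel x == k) = false := by simp [hx]
          by_cases hg : P (sel x) <;>
            simp [List.find?, hbx, hg, PySem.Dict.get?_insert, Ne.symm hx]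
    · simp only [if_neg hPk]
      by_cases hg : P (sel x)
      · have hx : sel x ≠ k := fun h => hPk (h ▸ hg)
        simp [hg, PySem.Dict.get?_insert, Ne.symm hx]
      · simp [hg]

-- a guarded insert loop only adds keys satisfying the guard
theorem keys_guardFold_bound {β : Type} (P : Int → Prop) [DecidablePred P]
    (sel : β → Int) (mkv : β → String) (l : List β) (d : PySem.Dict Int String)
    (h : ∀ k ∈ d.keys, P k) :
    ∀ k ∈ (l.foldl (fun d f => if P (sel f) then d.insert (sel f) (mkv f) else d) d).keys, P k := by
  induction l generalizing d with
  | nil => exact h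
  | cons x l ih =>
    simp only [List.foldl_cons]
    by_cases hg : P (sel x)
    · simp only [if_pos hg]
      exact ih _ (fun k hk => by
        rcases (PySem.Dict.mem_keys_insert _ _ _ _).1 hk with h1 | h1
        · exact h1 ▸ hg
        · exact h _ h1)
    · simp only [if_neg hg]; exact ih _ h

-- a guarded insert loop keeps the keys duplicate-free
theorem keys_guardFold_nodup {β : Type} (P : Int → Prop) [DecidablePred P]
    (sel : β → Int) (mkv : β → String) (l : List β) (d : PySem.Dict Int String)
    (h : d.keys.Nodup) :
    (l.foldl (fun d f => if P (sel f) then d.insert (sel f) (mkv f) else d) d).keys.Nodup := by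
  induction l generalizing d with
  | nil => exact h
  | cons x l ih =>
    simp only [List.foldl_cons]
    by_cases hg : P (sel x)
    · simp only [if_pos hg]; exact ih _ (PySem.Dict.nodup_keys_insert _ _ _ h)
    · simp only [if_neg hg]; exact ih _ h

-- a stretch of indices with no tag is emitted verbatim
theorem emitE_all_none (tags : PySem.Dict Int String) :
    ∀ (cs : List Char) (s : Int),
      (∀ i : Int, s ≤ i → i < s + cs.length → tags.get? i = none) →
      emitE tags cs s = cs := by
  intro cs
  induction cs with
  | nil => intro s _; rfl
  | cons c rest ih =>
    intro s h
    have hs : tags.get? s = none :=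
      h s le_rfl (by simp only [List.length_cons]; push_cast; omega)
    have hrest : emitE tags rest (s + 1) = rest :=
      ih (s + 1) (fun i h1 h2 => h i (by omega)
        (by simp only [List.length_cons]; push_cast at h2 ⊢; omega))
    simp [emitE, emitTag, hs, hrest]

theorem emitE_skip (tags : PySem.Dict Int String) :
    ∀ (t : Nat) (cs : List Char) (s : Int), t ≤ cs.length →
      (∀ i : Int, s ≤ i → i < s + t → tags.get? i = none) →
      emitE tags cs s = cs.take t ++ emitE tags (cs.drop t) (s + t) := by
  intro t
  induction t with
  | zero => intro cs s _ _; simp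
  | succ t ih =>
    intro cs s hle h
    cases cs with
    | nil => simp at hle
    | cons c rest =>
      have hs : tags.get? s = none := h s le_rfl (by push_cast; omega)
      have hrest := ih rest (s + 1) (by simpa using hle)
        (fun i h1 h2 => h i (by omega) (by push_cast at h2 ⊢; omega))
      have harith : s + 1 + (t : Int) = s + ((t + 1 : Nat) : Int) := by push_cast; ring
      rw [harith] at hrest
      simp [emitE, emitTag, hs, hrest]

-- A's match-step is "append the tag of this index"
theorem matchStep (openf closef : PySem.Dict Int String) (html : List Char) (i : Int) :
    (match openf.get? i with
     | some v => html ++ ('<' :: (v.toList ++ ['>']))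
     | none =>
       match closef.get? i with
       | some v => html ++ ('<' :: '/' :: (v.toList ++ ['>']))
       | none => html)
    = html ++ aTag openf closef i := by
  unfold aTag
  cases openf.get? i with
  | some v => rfl
  | none =>
    cases closef.get? i with
    | some v => rfl
    | none => simp

-- A's fold over enumerate is its per-index emission
theorem aLoop (openf closef : PySem.Dict Int String) :
    ∀ (cs : List Char) (s : Int) (acc : List Char),
      (PySem.List.enumerate cs s).foldl
        (fun (html : List Char) (p : Int × Char) =>
          (html ++ aTag openf closef p.1) ++ [p.2]) acc
      = acc ++ aEmit openf closef cs s := by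
  intro cs
  induction cs with
  | nil => intro s acc; simp [PySem.List.enumerate, aEmit]
  | cons c rest ih =>
    intro s acc
    rw [PySem.List.enumerate_cons]
    simp only [List.foldl_cons]
    rw [ih]
    simp [aEmit]

-- A's loop body (match form), fold-normalised: used to bridge the port to aLoop
theorem A_core (openf closef : PySem.Dict Int String) (cs : List Char) :
    (PySem.List.enumerate cs 0).foldl
      (fun (html : List Char) (p : Int × Char) =>
        (match openf.get? p.1 with
         | some v => html ++ ('<' :: (v.toList ++ ['>']))
         | none =>
           match closef.get? p.1 with
           | some v => html ++ ('<' :: '/' :: (v.toList ++ ['>']))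
           | none => html) ++ [p.2]) ([] : List Char)
    = aEmit openf closef cs 0 := by
  have hfun : (fun (html : List Char) (p : Int × Char) =>
      (match openf.get? p.1 with
       | some v => html ++ ('<' :: (v.toList ++ ['>']))
       | none =>
         match closef.get? p.1 with
         | some v => html ++ ('<' :: '/' :: (v.toList ++ ['>']))
         | none => html) ++ [p.2])
      = (fun (html : List Char) (p : Int × Char) =>
          (html ++ aTag openf closef p.1) ++ [p.2]) := by
    funext html p
    rw [matchStep]
  rw [hfun, aLoop]
  simp

-- per-index agreement of the two tag decisions, on in-range indices
theorem tag_pointwise (formats : List (String × Int × Int)) (n i : Int)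
    (h0 : 0 ≤ i) (hn : i < n) :
    aTag (addFormatToDict formats 1) (addFormatToDict formats 2) i
      = emitTag (bTags formats n) i := by
  have hopen : (addFormatToDict formats 1).get? i
      = (match formats.reverse.find? (fun f => f.2.1 == i) with
         | some f => some f.1
         | none => none) := by
    have h := get?_plainFold (fun f : String × Int × Int => f.2.1) (fun f => f.1)
      formats PySem.Dict.empty i
    rw [show addFormatToDict formats 1
        = formats.foldl (fun d (f : String × Int × Int) => d.insert f.2.1 f.1)
            PySem.Dict.empty from rfl, h]
    cases formats.reverse.find? (fun f : String × Int × Int => f.2.1 == i) with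
    | some f => rfl
    | none => simp [PySem.Dict.get?_empty]
  have hclose : (addFormatToDict formats 2).get? i
      = (match formats.reverse.find? (fun f => f.2.2 == i) with
         | some f => some f.1
         | none => none) := by
    have h := get?_plainFold (fun f : String × Int × Int => f.2.2) (fun f => f.1)
      formats PySem.Dict.empty i
    rw [show addFormatToDict formats 2
        = formats.foldl (fun d (f : String × Int × Int) => d.insert f.2.2 f.1)
            PySem.Dict.empty from rfl, h]
    cases formats.reverse.find? (fun f : String × Int × Int => f.2.2 == i) with
    | some f => rfl
    | none => simp [PySem.Dict.get?_empty]
  have hP : 0 ≤ i ∧ i < n := ⟨h0, hn⟩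
  have hbo : (bTags formats n).get? i
      = (match formats.reverse.find? (fun f => f.2.1 == i) with
         | some f => some ("<" ++ f.1 ++ ">")
         | none =>
           match formats.reverse.find? (fun f => f.2.2 == i) with
           | some f => some ("</" ++ f.1 ++ ">")
           | none => none) := by
    have h1 := get?_guardFold (fun k => 0 ≤ k ∧ k < n)
      (fun f : String × Int × Int => f.2.1) (fun f => "<" ++ f.1 ++ ">") formats
      (formats.foldl
        (fun (d : PySem.Dict Int String) f =>
          if 0 ≤ f.2.2 ∧ f.2.2 < n then d.insert f.2.2 ("</" ++ f.1 ++ ">") else d)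
        PySem.Dict.empty) i
    have h2 := get?_guardFold (fun k => 0 ≤ k ∧ k < n)
      (fun f : String × Int × Int => f.2.2) (fun f => "</" ++ f.1 ++ ">") formats
      PySem.Dict.empty i
    simp only [if_pos hP] at h1 h2
    rw [bTags, h1]
    cases formats.reverse.find? (fun f : String × Int × Int => f.2.1 == i) with
    | some f => rfl
    | none =>
      rw [h2]
      cases formats.reverse.find? (fun f : String × Int × Int => f.2.2 == i) with
      | some f => rfl
      | none => simp [PySem.Dict.get?_empty]
  unfold aTag emitTag
  rw [hopen, hclose, hbo]
  cases formats.reverse.find? (fun f : String × Int × Int => f.2.1 == i) with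
  | some f => simp [String.toList_append]
  | none =>
    cases formats.reverse.find? (fun f : String × Int × Int => f.2.2 == i) with
    | some f => simp [String.toList_append]
    | none => simp

theorem aEmit_eq_emitE (openf closef : PySem.Dict Int String) (tags : PySem.Dict Int String) :
    ∀ (cs : List Char) (s : Int),
      (∀ i : Int, s ≤ i → i < s + cs.length → aTag openf closef i = emitTag tags i) →
      aEmit openf closef cs s = emitE tags cs s := by
  intro cs
  induction cs with
  | nil => intro s _; rfl
  | cons c rest ih =>
    intro s h
    have hs := h s le_rfl (by simp only [List.length_cons]; push_cast; omega)
    have hrest := ih (s + 1) (fun i h1 h2 => h i (by omega)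
      (by simp only [List.length_cons]; push_cast at h2 ⊢; omega))
    simp only [aEmit, emitE, hs, hrest]

-- A's result, canonically
theorem A_eq (str : String) (formats : List (String × Int × Int)) :
    stringToHTML str formats
      = String.ofList (aEmit (addFormatToDict formats 1) (addFormatToDict formats 2) str.toList 0) :=
  congrArg String.ofList (A_core (addFormatToDict formats 1) (addFormatToDict formats 2) str.toList)

-- B's walk over the sorted tag positions, from an already-emitted position p
theorem walk2 (chars : List Char) (tags : PySem.Dict Int String) :
    ∀ (ks : List Int) (p : Nat) (acc : List Char) (hp : p < chars.length),
      ks.Pairwise (· < ·) →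
      (∀ k ∈ ks, (p : Int) < k ∧ k < (chars.length : Int)) →
      (∀ i : Int, (p : Int) < i → (i ∈ ks ↔ i ∈ tags.keys)) →
      (ks.foldl
          (fun (st : List Char × Int) pos =>
            (st.1 ++ PySem.List.slice chars (some st.2) (some pos)
                 ++ (tags.getD pos "").toList, pos)) (acc, (p : Int))).1
        ++ PySem.List.slice chars
             (some (ks.foldl
               (fun (st : List Char × Int) pos =>
                 (st.1 ++ PySem.List.slice chars (some st.2) (some pos)
                      ++ (tags.getD pos "").toList, pos)) (acc, (p : Int))).2) none
      = acc ++ chars[p]'hp :: emitE tags (chars.drop (p + 1)) ((p : Int) + 1) := by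
  intro ks
  induction ks with
  | nil =>
    intro p acc hp _ _ hmem
    simp only [List.foldl_nil]
    rw [PySem.List.slice_from_natCast, List.drop_eq_getElem_cons hp]
    have hre : emitE tags (chars.drop (p + 1)) ((p : Int) + 1) = chars.drop (p + 1) := by
      apply emitE_all_none
      intro i h1 _
      rw [PySem.Dict.get?_eq_none_iff_not_mem_keys]
      intro hk
      exact List.not_mem_nil ((hmem i (by omega)).2 hk)
    rw [hre]
  | cons k ks ih =>
    intro p acc hp hpw hbound hmem
    obtain ⟨hpk, hkn⟩ := hbound k List.mem_cons_self
    set q : Nat := k.toNat with hq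
    have hkq : k = (q : Int) := by omega
    have hpq : p < q := by omega
    have hqn : q < chars.length := by omega
    rw [hkq] at hpk
    simp only [List.foldl_cons]
    rw [hkq]
    have hrec := ih q (acc ++ PySem.List.slice chars (some (p : Int)) (some ((q : Nat) : Int))
        ++ (tags.getD ((q : Nat) : Int) "").toList) hqn hpw.of_cons
      (fun k' hk' => ⟨by have := List.rel_of_pairwise_cons hpw hk'; omega,
                      (hbound k' (List.mem_cons_of_mem _ hk')).2⟩)
      (fun i hi => by
        constructor
        · intro h; exact (hmem i (by omega)).1 (List.mem_cons_of_mem _ h)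
        · intro h
          rcases List.mem_cons.1 ((hmem i (by omega)).2 h) with h1 | h1
          · exfalso; omega
          · exact h1)
    rw [hrec]
    have step1 : PySem.List.slice chars (some (p : Int)) (some ((q : Nat) : Int))
        = chars[p]'hp :: (chars.drop (p + 1)).take (q - (p + 1)) := by
      rw [PySem.List.slice_natCast, List.drop_eq_getElem_cons hp]
      have hqp : q - p = (q - (p + 1)) + 1 := by omega
      rw [hqp, List.take_succ_cons]
    have hskip : emitE tags (chars.drop (p + 1)) ((p : Int) + 1)
        = (chars.drop (p + 1)).take (q - (p + 1))
          ++ emitE tags (chars.drop q) ((q : Int)) := by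
      have h1 := emitE_skip tags (q - (p + 1)) (chars.drop (p + 1)) ((p : Int) + 1)
        (by simp only [List.length_drop]; omega)
        (fun i hi1 hi2 => by
          rw [PySem.Dict.get?_eq_none_iff_not_mem_keys]
          intro hk'
          have hik : i < k := by omega
          rcases List.mem_cons.1 ((hmem i (by omega)).2 hk') with h1 | h1
          · omega
          · have := List.rel_of_pairwise_cons hpw h1; omega)
      rw [h1, List.drop_drop]
      have e1 : p + 1 + (q - (p + 1)) = q := by omega
      have e2 : (p : Int) + 1 + ((q - (p + 1) : Nat) : Int) = (q : Int) := by omega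
      rw [e1, e2]
    have hdq : emitE tags (chars.drop q) ((q : Int))
        = emitTag tags ((q : Nat) : Int)
          ++ chars[q]'hqn :: emitE tags (chars.drop (q + 1)) (((q : Nat) : Int) + 1) := by
      rw [List.drop_eq_getElem_cons hqn]
      simp only [emitE]
    rw [hskip, hdq, step1]
    simp only [emitTag, PySem.Dict.getD_eq_get?_getD]
    simp [List.append_assoc]

-- keys of B's table are in range and duplicate-free
theorem bTags_keys_bound (formats : List (String × Int × Int)) (n : Int) :
    ∀ k ∈ (bTags formats n).keys, 0 ≤ k ∧ k < n := by
  unfold bTags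
  refine keys_guardFold_bound (fun k => 0 ≤ k ∧ k < n)
    (fun f : String × Int × Int => f.2.1) (fun f => "<" ++ f.1 ++ ">") formats _ ?_
  refine keys_guardFold_bound (fun k => 0 ≤ k ∧ k < n)
    (fun f : String × Int × Int => f.2.2) (fun f => "</" ++ f.1 ++ ">") formats _ ?_
  simp [PySem.Dict.keys_empty]

theorem bTags_keys_nodup (formats : List (String × Int × Int)) (n : Int) :
    (bTags formats n).keys.Nodup := by
  unfold bTags
  refine keys_guardFold_nodup (fun k => 0 ≤ k ∧ k < n)
    (fun f : String × Int × Int => f.2.1) (fun f => "<" ++ f.1 ++ ">") formats _ ?_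
  refine keys_guardFold_nodup (fun k => 0 ≤ k ∧ k < n)
    (fun f : String × Int × Int => f.2.2) (fun f => "</" ++ f.1 ++ ">") formats _ ?_
  exact PySem.Dict.nodup_keys_empty

-- B's sorted walk over an arbitrary in-range tag table is the canonical emission
theorem B_core (chars : List Char) (tags : PySem.Dict Int String)
    (hbound : ∀ k ∈ tags.keys, 0 ≤ k ∧ k < (chars.length : Int))
    (hnd : tags.keys.Nodup) :
    ((PySem.List.sorted tags.keys (fun k => k)).foldl
        (fun (st : List Char × Int) pos =>
          (st.1 ++ PySem.List.slice chars (some st.2) (some pos)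
               ++ (tags.getD pos "").toList, pos)) (([] : List Char), (0 : Int))).1
      ++ PySem.List.slice chars
           (some ((PySem.List.sorted tags.keys (fun k => k)).foldl
             (fun (st : List Char × Int) pos =>
               (st.1 ++ PySem.List.slice chars (some st.2) (some pos)
                    ++ (tags.getD pos "").toList, pos)) (([] : List Char), (0 : Int))).2) none
    = emitE tags chars 0 := by
  have hnodup : (PySem.List.sorted tags.keys (fun k => k)).Nodup :=
    (PySem.List.sorted_perm tags.keys (fun k => k) false).nodup_iff.mpr hnd
  have hstrict : (PySem.List.sorted tags.keys (fun k => k)).Pairwise (· < ·) := by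
    have h1 := PySem.List.sorted_pairwise tags.keys (fun k => k)
    exact ((h1.and hnodup).imp (fun h => lt_of_le_of_ne h.1 h.2))
  have hmemkeys : ∀ i : Int, i ∈ PySem.List.sorted tags.keys (fun k => k) ↔ i ∈ tags.keys :=
    fun i => PySem.List.mem_sorted tags.keys (fun k => k) false i
  cases hks : PySem.List.sorted tags.keys (fun k => k) with
  | nil =>
    simp only [List.foldl_nil]
    rw [PySem.List.slice_zero_start, PySem.List.slice_none_none]
    have hempty : tags.keys = [] := by rwa [PySem.List.sorted_eq_nil_iff] at hks
    have hre : emitE tags chars 0 = chars := by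
      apply emitE_all_none
      intro i _ _
      rw [PySem.Dict.get?_eq_none_iff_not_mem_keys, hempty]
      exact List.not_mem_nil
    rw [hre]
    simp
  | cons k ks =>
    have hstrict' := hks ▸ hstrict
    have hkmem : k ∈ tags.keys := (hmemkeys k).1 (hks ▸ List.mem_cons_self)
    obtain ⟨hk0, hkn⟩ := hbound k hkmem
    set q : Nat := k.toNat with hq
    have hkq : k = (q : Int) := by omega
    have hqn : q < chars.length := by omega
    simp only [List.foldl_cons]
    rw [hkq]
    have hrec := walk2 chars tags ks q
      ([] ++ PySem.List.slice chars (some (0 : Int)) (some ((q : Nat) : Int))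
        ++ (tags.getD ((q : Nat) : Int) "").toList) hqn hstrict'.of_cons
      (fun k' hk' => ⟨by have := List.rel_of_pairwise_cons hstrict' hk'; omega,
        (hbound k' ((hmemkeys k').1 (hks ▸ List.mem_cons_of_mem _ hk'))).2⟩)
      (fun i hi => by
        constructor
        · intro h; exact (hmemkeys i).1 (hks ▸ List.mem_cons_of_mem _ h)
        · intro h
          have h' := (hmemkeys i).2 h
          rw [hks] at h'
          rcases List.mem_cons.1 h' with h1 | h1
          · exfalso; omega
          · exact h1)
    have hzero : ((0 : Int)) = ((0 : Nat) : Int) := rfl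
    rw [hzero] at hrec ⊢
    rw [hrec]
    have step1 : PySem.List.slice chars (some ((0 : Nat) : Int)) (some ((q : Nat) : Int))
        = chars.take q := by
      rw [PySem.List.slice_natCast]
      simp
    have hskip : emitE tags chars ((0 : Nat) : Int)
        = chars.take q ++ emitE tags (chars.drop q) ((q : Int)) := by
      have h1 := emitE_skip tags q chars 0 (le_of_lt hqn)
        (fun i hi1 hi2 => by
          rw [PySem.Dict.get?_eq_none_iff_not_mem_keys]
          intro hk'
          have h' := (hmemkeys i).2 hk'
          rw [hks] at h'
          have hik : i < k := by omega
          rcases List.mem_cons.1 h' with h1 | h1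
          · omega
          · have := List.rel_of_pairwise_cons hstrict' h1; omega)
      rw [Nat.cast_zero, h1]
      simp
    have hdq : emitE tags (chars.drop q) ((q : Int))
        = emitTag tags ((q : Nat) : Int)
          ++ chars[q]'hqn :: emitE tags (chars.drop (q + 1)) (((q : Nat) : Int) + 1) := by
      rw [List.drop_eq_getElem_cons hqn]
      simp only [emitE]
    rw [hskip, hdq, step1]
    simp only [emitTag, PySem.Dict.getD_eq_get?_getD]
    simp [List.append_assoc]

-- B's result, canonically
theorem B_eq (str : String) (formats : List (String × Int × Int)) :
    stringToHTML_alt str formats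
      = String.ofList (emitE (bTags formats (str.toList.length : Int)) str.toList 0) :=
  congrArg String.ofList (B_core str.toList (bTags formats (str.toList.length : Int))
    (bTags_keys_bound formats (str.toList.length : Int))
    (bTags_keys_nodup formats (str.toList.length : Int)))

-- ===== VERDICT (by name: the statement is the Claim_ definition above) =====
theorem stringToHTML_spec : Claim_equal_stringToHTML := by
  intro str formats _
  unfold Spec_stringToHTML
  rw [A_eq, B_eq]
  congr 1
  apply aEmit_eq_emitE
  intro i h1 h2
  exact tag_pointwise formats (str.toList.length : Int) i h1 (by simpa using h2)
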